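-- pv_equiv track=rewrite | github.com/FixingMyHinglish/mech-interp-for-codeswitching | experiments/exp2_switch_point_activations/run.py | label_tokens_vocab
-- ===== SOURCE A (Python) =====
-- def label_tokens_vocab(
--     cs_token_ids: list[int],
--     en_token_ids: list[int],
--     tl_token_ids: list[int],
-- ) -> list[str]:
--     """
--     Assign a language label to every CS token position using the monolingual
--     baseline token vocabularies for that sample.
--
--     Logic per token:
--       - appears in en_vocab only  → 'english'
--       - appears in tl_vocab only  → 'target'
--       - appears in both or neither → 'other'
--
--     Ambiguous ('other') tokens carry forward the most recent non-other label
--     so that switch transitions through shared/unknown tokens are still detected.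
--
--     No external libraries required. Works for both same-script pairs
--     (French-English) and different-script pairs (Hindi-English).
--     """
--     en_vocab = set(en_token_ids)
--     tl_vocab = set(tl_token_ids)
--
--     raw: list[str] = []
--     for tid in cs_token_ids:
--         in_en = tid in en_vocab
--         in_tl = tid in tl_vocab
--         if in_en and not in_tl:
--             raw.append("english")
--         elif in_tl and not in_en:
--             raw.append("target")
--         else:
--             raw.append("other")
--
--     # Forward-fill: ambiguous tokens inherit the last known language label.
--     labels: list[str] = []
--     last_known = "other"
--     for lab in raw:
--         if lab != "other":
--             last_known = lab
--         labels.append(last_known if lab == "other" else lab)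
--
--     return labels
-- ===== SOURCE B (Python) =====
-- def label_tokens_vocab(
--     cs_token_ids: list[int],
--     en_token_ids: list[int],
--     tl_token_ids: list[int],
-- ) -> list[str]:
--     """Single pass: keep a running last_known label instead of building a raw
--     label list and forward-filling it in a second pass."""
--     en_vocab = set(en_token_ids)
--     tl_vocab = set(tl_token_ids)
--
--     labels: list[str] = []
--     last_known = "other"
--     for tid in cs_token_ids:
--         in_en = tid in en_vocab
--         in_tl = tid in tl_vocab
--         if in_en and not in_tl:
--             last_known = "english"
--             labels.append("english")
--         elif in_tl and not in_en:
--             last_known = "target"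
--             labels.append("target")
--         else:
--             labels.append(last_known)
--     return labels
-- ===== Notes on version B (the rewrite author's own statement) =====
-- stated objective: simpler
-- what changed: Fuses A's build-raw-list-then-forward-fill two-pass scheme into a single pass that maintains a running last_known label and emits the final label directly, eliminating the intermediate raw list.
import Mathlib
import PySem

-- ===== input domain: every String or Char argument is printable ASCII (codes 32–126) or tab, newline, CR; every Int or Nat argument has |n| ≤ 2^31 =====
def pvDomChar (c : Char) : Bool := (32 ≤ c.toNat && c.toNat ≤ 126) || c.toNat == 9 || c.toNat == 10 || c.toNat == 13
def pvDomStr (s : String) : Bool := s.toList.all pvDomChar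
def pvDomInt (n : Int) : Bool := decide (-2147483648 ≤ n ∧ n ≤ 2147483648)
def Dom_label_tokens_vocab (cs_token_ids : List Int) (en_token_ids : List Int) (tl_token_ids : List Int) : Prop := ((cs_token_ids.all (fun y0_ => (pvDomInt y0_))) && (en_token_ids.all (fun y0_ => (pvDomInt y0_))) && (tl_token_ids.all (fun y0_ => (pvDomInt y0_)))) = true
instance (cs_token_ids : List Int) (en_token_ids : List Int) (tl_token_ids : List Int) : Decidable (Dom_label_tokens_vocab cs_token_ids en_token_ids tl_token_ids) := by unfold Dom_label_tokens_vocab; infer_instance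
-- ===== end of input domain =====

-- B fuses A's build-then-forward-fill two-pass scheme into one pass with a running last_known label (objective: simpler).

-- ===== PORT A =====
def label_tokens_vocab (cs_token_ids : List Int) (en_token_ids : List Int) (tl_token_ids : List Int) : List String :=
  let en_vocab : PySem.Set Int := PySem.Set.ofList en_token_ids
  let tl_vocab : PySem.Set Int := PySem.Set.ofList tl_token_ids
  let raw : List String := cs_token_ids.foldl (fun acc tid =>
    let in_en := PySem.Set.contains en_vocab tid
    let in_tl := PySem.Set.contains tl_vocab tid
    if in_en && !in_tl then acc ++ ["english"]
    else if in_tl && !in_en then acc ++ ["target"]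
    else acc ++ ["other"]) []
  (raw.foldl (fun (st : List String × String) lab =>
    let last_known := if lab ≠ "other" then lab else st.2
    (st.1 ++ [if lab = "other" then last_known else lab], last_known)) ([], "other")).1

-- ===== PORT B =====
def labelGo (en_vocab tl_vocab : PySem.Set Int) (last_known : String) : List Int → List String
  | [] => []
  | tid :: rest =>
    let in_en := PySem.Set.contains en_vocab tid
    let in_tl := PySem.Set.contains tl_vocab tid
    if in_en && !in_tl then "english" :: labelGo en_vocab tl_vocab "english" rest
    else if in_tl && !in_en then "target" :: labelGo en_vocab tl_vocab "target" rest
    else last_known :: labelGo en_vocab tl_vocab last_known rest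

def label_tokens_vocab_alt (cs_token_ids : List Int) (en_token_ids : List Int) (tl_token_ids : List Int) : List String :=
  labelGo (PySem.Set.ofList en_token_ids) (PySem.Set.ofList tl_token_ids) "other" cs_token_ids

-- ===== PRECONDITION & SPEC =====
def Spec_label_tokens_vocab (cs_token_ids : List Int) (en_token_ids : List Int) (tl_token_ids : List Int) (out : List String) : Prop := out = label_tokens_vocab_alt cs_token_ids en_token_ids tl_token_ids
instance (cs_token_ids : List Int) (en_token_ids : List Int) (tl_token_ids : List Int) (out : List String) : Decidable (Spec_label_tokens_vocab cs_token_ids en_token_ids tl_token_ids out) := by unfold Spec_label_tokens_vocab; infer_instance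

-- ===== CLAIM (what is proved, stated in full; the proofs are below) =====
def Claim_equal_label_tokens_vocab : Prop := ∀ (cs_token_ids : List Int) (en_token_ids : List Int) (tl_token_ids : List Int), Dom_label_tokens_vocab cs_token_ids en_token_ids tl_token_ids → Spec_label_tokens_vocab cs_token_ids en_token_ids tl_token_ids (label_tokens_vocab cs_token_ids en_token_ids tl_token_ids)

-- ===== LEMMAS AND PROOFS =====

/-- A's per-token raw label. -/
def classify (en_vocab tl_vocab : PySem.Set Int) (tid : Int) : String :=
  if PySem.Set.contains en_vocab tid && !PySem.Set.contains tl_vocab tid then "english"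
  else if PySem.Set.contains tl_vocab tid && !PySem.Set.contains en_vocab tid then "target"
  else "other"

/-- A's first loop appends the classifications. -/
lemma raw_foldl_eq (en tl : PySem.Set Int) (cs : List Int) (acc : List String) :
    cs.foldl (fun acc tid =>
      let in_en := PySem.Set.contains en tid
      let in_tl := PySem.Set.contains tl tid
      if in_en && !in_tl then acc ++ ["english"]
      else if in_tl && !in_en then acc ++ ["target"]
      else acc ++ ["other"]) acc
    = acc ++ cs.map (classify en tl) := by
  induction cs generalizing acc with
  | nil => simp
  | cons c cs ih =>
    simp only [List.foldl_cons, List.map_cons, ih, classify]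
    split_ifs <;> simp

/-- A's second loop on the classified list equals B's single-pass recursion. -/
lemma fill_eq_go (en tl : PySem.Set Int) (cs : List Int) (acc : List String) (last : String) :
    ((cs.map (classify en tl)).foldl (fun (st : List String × String) lab =>
      let last_known := if lab ≠ "other" then lab else st.2
      (st.1 ++ [if lab = "other" then last_known else lab], last_known)) (acc, last)).1
    = acc ++ labelGo en tl last cs := by
  induction cs generalizing acc last with
  | nil => simp [labelGo]
  | cons c cs ih =>
    simp only [List.map_cons, List.foldl_cons, labelGo]
    by_cases h1 : c ∈ en ∧ c ∉ tl
    · simpa [classify, h1] using ih (acc ++ ["english"]) "english"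
    · by_cases h2 : c ∈ tl ∧ c ∉ en
      · simpa [classify, h1, h2] using ih (acc ++ ["target"]) "target"
      · simpa [classify, h1, h2] using ih (acc ++ [last]) last

-- ===== VERDICT (by name: the statement is the Claim_ definition above) =====
theorem label_tokens_vocab_spec : Claim_equal_label_tokens_vocab := by
  intro cs en tl _
  show _ = _
  simp only [label_tokens_vocab, label_tokens_vocab_alt]
  rw [raw_foldl_eq, List.nil_append, fill_eq_go, List.nil_append]
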